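-- pv_equiv track=rewrite | github.com/Taaaepang/bakjoon | DFS|BFS3.py | dfs
-- ===== SOURCE A (Python) =====
-- from collections import Counter
--
-- def dfs(depth, start, target, words, visited):
--     for i in range(len(target)):
--         if visited[i] == False:
--             if len(Counter(start) - Counter(target[i])) != 1:
--                 continue
--             else:
--                 visited[i] = True
--                 if len(Counter(start) - Counter(words)) == 1:
--                     return depth
--                 return dfs(depth + 1, target[i], target, words, visited)
-- ===== SOURCE B (Python) =====
-- from collections import Counter
--
-- def dfs(depth, start, target, words, visited):
--     # Iterative re-implementation: a while-loop maintaining (depth, start),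
--     # committing to the first unvisited one-letter-off candidate each round.
--     n = len(target)
--     while True:
--         i = next((j for j in range(n)
--                   if not visited[j] and len(Counter(start) - Counter(target[j])) == 1),
--                  None)
--         if i is None:
--             return None
--         visited[i] = True
--         if len(Counter(start) - Counter(words)) == 1:
--             return depth
--         start = target[i]
--         depth += 1
-- ===== Notes on version B (the rewrite author's own statement) =====
-- stated objective: alternative
-- what changed: A's tail recursion (one recursive call per committed word, re-entering the function with a fresh loop) is replaced by a single iterative while-loop that maintains the evolving (depth, start) state and finds each round's first unvisited one-letter-off candidate with a next(...) first-match search.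
-- outside the precondition, e.g. on dfs(0, 'ax', ['x', 'y'], 'x', [False]): A returns 0, B returns 0
import Mathlib
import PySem

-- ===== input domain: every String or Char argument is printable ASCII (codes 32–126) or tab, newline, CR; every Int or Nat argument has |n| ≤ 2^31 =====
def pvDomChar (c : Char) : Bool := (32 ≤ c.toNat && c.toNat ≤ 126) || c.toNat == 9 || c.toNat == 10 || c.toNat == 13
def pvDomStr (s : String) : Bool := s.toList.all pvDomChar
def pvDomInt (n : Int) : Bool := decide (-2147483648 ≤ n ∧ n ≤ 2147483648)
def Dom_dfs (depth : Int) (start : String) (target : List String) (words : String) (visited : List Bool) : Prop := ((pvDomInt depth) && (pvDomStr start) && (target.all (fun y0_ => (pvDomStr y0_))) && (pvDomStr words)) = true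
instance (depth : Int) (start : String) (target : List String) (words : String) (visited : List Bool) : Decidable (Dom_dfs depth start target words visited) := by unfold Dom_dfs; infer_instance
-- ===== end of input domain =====

-- B replaces A's recursion by an iterative loop over an evolving (depth, start) state
-- (same return value and the same in-place visited mutation as A).

-- len(Counter(a) - Counter(b)): number of distinct chars of a whose multiplicity in a
-- exceeds that in b (Counter subtraction keeps only positive counts; len counts keys).
-- Exact for Python on all strings; shared by both ports since both call this expression.
def pvCDiffLen (a b : List Char) : Nat :=
  ((PySem.List.dedup a).filter (fun c => decide (b.count c < a.count c))).length

-- ===== PORT A =====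
-- the for-loop of A: scan i upward; 'continue' on a visited entry or a diff ≠ 1
def pvScanA (start : String) (target : List String) (visited : List Bool) (i : Nat) : Option Nat :=
  if _h : i < target.length then
    if PySem.List.pyGet? visited (i : Int) == some false then
      if pvCDiffLen start.toList ((target.getD i "").toList) ≠ 1 then
        pvScanA start target visited (i + 1)
      else some i
    else pvScanA start target visited (i + 1)
  else none
termination_by target.length - i

theorem pvScanA_visited {s : String} {t : List String} {v : List Bool} {i j : Nat}
    (h : pvScanA s t v i = some j) : PySem.List.pyGet? v (j : Int) = some false := by
  fun_induction pvScanA s t v i with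
  | case1 i hi hv hd ih => exact ih h
  | case2 i hi hv hd =>
      simp only [Option.some.injEq] at h
      subst h; simpa using hv
  | case3 i hi hv ih => exact ih h
  | case4 i hi => simp at h

theorem pv_count_false_set_lt {v : List Bool} {j : Nat}
    (h : PySem.List.pyGet? v (j : Int) = some false) :
    (v.set j true).count false < v.count false := by
  rw [PySem.List.pyGet?_natCast] at h
  have hj : j < v.length := by
    by_contra hc
    simp [List.getElem?_eq_none (by omega : v.length ≤ j)] at h
  have hv : v[j] = false := by simpa [List.getElem?_eq_getElem hj] using h
  have hset : v.set j true = v.take j ++ true :: v.drop (j + 1) := by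
    rw [List.set_eq_take_append_cons_drop, if_pos hj]
  have hvsplit : v = v.take j ++ v[j] :: v.drop (j + 1) := by
    conv_lhs => rw [← List.take_append_drop j v, ← List.getElem_cons_drop hj]
  rw [hset]
  conv_rhs => rw [hvsplit]
  simp [List.count_append, hv]

def dfs (depth : Int) (start : String) (target : List String) (words : String) (visited : List Bool) : Option Int :=
  match h : pvScanA start target visited 0 with
  | none => none                                   -- loop fell through: implicit 'return None'
  | some i =>
      let visited' := visited.set i true           -- visited[i] = True
      if pvCDiffLen start.toList words.toList = 1 then some depth
      else dfs (depth + 1) (target.getD i "") target words visited'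
termination_by visited.count false
decreasing_by exact pv_count_false_set_lt (pvScanA_visited h)

-- ===== PORT B =====
-- next((j for j in range(n) if not visited[j] and len(Counter(start)-Counter(target[j]))==1), None)
def pvStepB (start : String) (target : List String) (visited : List Bool) : Option Nat :=
  (List.range target.length).find? (fun j =>
    (PySem.List.pyGet? visited (j : Int) == some false) &&
    (pvCDiffLen start.toList ((target.getD j "").toList) == 1))

-- the 'while True' loop of B as tail recursion on its mutable state (depth, start, visited)
def dfs_alt (depth : Int) (start : String) (target : List String) (words : String) (visited : List Bool) : Option Int :=
  match h : pvStepB start target visited with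
  | none => none
  | some i =>
      let visited' := visited.set i true
      if pvCDiffLen start.toList words.toList = 1 then some depth
      else dfs_alt (depth + 1) (target.getD i "") target words visited'
termination_by visited.count false
decreasing_by
  exact pv_count_false_set_lt (by
    have hh := List.find?_some h
    simp only [Bool.and_eq_true, beq_iff_eq] at hh
    exact hh.1)

-- ===== PRECONDITION & SPEC =====
-- Pre_ excludes visited lists shorter than target: there A's scan raises IndexError whenever it
-- reaches an out-of-range index (a slightly wider, closed-form superset of the exact raise set;
-- on the excluded inputs where A still returns early, B returns the same value).
def Pre_dfs (depth : Int) (start : String) (target : List String) (words : String) (visited : List Bool) : Prop :=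
  target.length ≤ visited.length
instance (depth : Int) (start : String) (target : List String) (words : String) (visited : List Bool) : Decidable (Pre_dfs depth start target words visited) := by unfold Pre_dfs; infer_instance

def pvWitness_dfs : Int × String × List String × String × List Bool := (0, "ab", ["b"], "b", [false])

def Spec_dfs (depth : Int) (start : String) (target : List String) (words : String) (visited : List Bool) (out : Option Int) : Prop := out = dfs_alt depth start target words visited
instance (depth : Int) (start : String) (target : List String) (words : String) (visited : List Bool) (out : Option Int) : Decidable (Spec_dfs depth start target words visited out) := by unfold Spec_dfs; infer_instance

-- ===== CLAIM (what is proved, stated in full; the proofs are below) =====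
def Claim_equal_dfs : Prop := ∀ (depth : Int) (start : String) (target : List String) (words : String) (visited : List Bool), Dom_dfs depth start target words visited → Pre_dfs depth start target words visited → Spec_dfs depth start target words visited (dfs depth start target words visited)

-- ===== LEMMAS AND PROOFS =====

-- A's index-scanning loop finds exactly what B's first-match search finds.
theorem pvScanA_eq_find? (s : String) (t : List String) (v : List Bool) :
    ∀ i, pvScanA s t v i = (List.range' i (t.length - i)).find? (fun (j : Nat) =>
      (PySem.List.pyGet? v (j : Int) == some false) &&
      (pvCDiffLen s.toList ((t.getD j "").toList) == 1)) := by
  intro i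
  fun_induction pvScanA s t v i with
  | case1 i hi hv hd ih =>
      have hlen : t.length - i = (t.length - (i + 1)) + 1 := by omega
      rw [hlen, List.range'_succ, List.find?_cons]
      simp only [PySem.List.pyGet?_natCast, List.getD_eq_getElem?_getD] at hv hd
      have hd' : (pvCDiffLen s.toList (t[i]?.getD "").toList == 1) = false := by simpa using hd
      simp [hv, hd', ih]
  | case2 i hi hv hd =>
      have hlen : t.length - i = (t.length - (i + 1)) + 1 := by omega
      rw [hlen, List.range'_succ, List.find?_cons]
      simp only [ne_eq, not_not] at hd
      simp only [PySem.List.pyGet?_natCast, List.getD_eq_getElem?_getD] at hv hd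
      simp [hv, hd]
  | case3 i hi hv ih =>
      have hlen : t.length - i = (t.length - (i + 1)) + 1 := by omega
      rw [hlen, List.range'_succ, List.find?_cons]
      simp only [PySem.List.pyGet?_natCast] at hv
      simp [hv, ih]
  | case4 i hi =>
      have hlen : t.length - i = 0 := by omega
      simp [hlen]

theorem pvScanA_eq_stepB (s : String) (t : List String) (v : List Bool) :
    pvScanA s t v 0 = pvStepB s t v := by
  rw [pvScanA_eq_find?, pvStepB, List.range_eq_range']
  simp

-- A and B agree everywhere (the precondition is only needed for the Python sides not to raise).
theorem dfs_eq_alt (target : List String) (words : String) :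
    ∀ (n : Nat) (visited : List Bool), visited.count false = n →
      ∀ (depth : Int) (start : String),
        dfs depth start target words visited = dfs_alt depth start target words visited := by
  intro n
  induction n using Nat.strong_induction_on with
  | _ n ih =>
    intro visited hn depth start
    rw [dfs, dfs_alt, ← pvScanA_eq_stepB]
    cases h : pvScanA start target visited 0 with
    | none => rfl
    | some i =>
        simp only
        split
        · rfl
        · exact ih _ (hn ▸ pv_count_false_set_lt (pvScanA_visited h)) _ rfl _ _

-- ===== VERDICT (by name: the statement is the Claim_ definition above) =====
theorem dfs_spec : Claim_equal_dfs := by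
  intro depth start target words visited _ _
  exact dfs_eq_alt target words _ visited rfl depth start
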